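-- pv_equiv track=rewrite | github.com/A-stick-bug/CCC-Solutions | CCC '11 S3 - Alice Through the Looking Glass.py | crystalSquaresatX
-- ===== SOURCE A (Python) =====
-- def crystalSquaresatX(m, x):
--     if m >= 1:
--         power = 5 ** (m - 1)
--         location = x // power
--         if location == 0 or location == 4:  # no crystal
--             return 0
--
--         elif location == 1 or location == 3:  # columns 1 and 3
--             return 1 * power + crystalSquaresatX(m - 1, x % power)
--
--         elif location == 2:  # middle column
--             return 2 * power + crystalSquaresatX(m - 1, x % power)
--     return 0
-- ===== SOURCE B (Python) =====
-- def crystalSquaresatX(m, x):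
--     if m < 1:
--         return 0
--     total = 0
--     power = 5 ** (m - 1)
--     while power >= 1:
--         location = x // power
--         if location == 1 or location == 3:
--             total += power
--             x %= power
--         elif location == 2:
--             total += 2 * power
--             x %= power
--         else:
--             break
--         power //= 5
--     return total
-- ===== Notes on version B (the rewrite author's own statement) =====
-- stated objective: alternative
-- what changed: Replaces A's recursion over m with a flat iterative loop keeping a running total, a running power of 5 and a shrinking x, breaking on the first digit outside {1,2,3}.
import Mathlib
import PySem

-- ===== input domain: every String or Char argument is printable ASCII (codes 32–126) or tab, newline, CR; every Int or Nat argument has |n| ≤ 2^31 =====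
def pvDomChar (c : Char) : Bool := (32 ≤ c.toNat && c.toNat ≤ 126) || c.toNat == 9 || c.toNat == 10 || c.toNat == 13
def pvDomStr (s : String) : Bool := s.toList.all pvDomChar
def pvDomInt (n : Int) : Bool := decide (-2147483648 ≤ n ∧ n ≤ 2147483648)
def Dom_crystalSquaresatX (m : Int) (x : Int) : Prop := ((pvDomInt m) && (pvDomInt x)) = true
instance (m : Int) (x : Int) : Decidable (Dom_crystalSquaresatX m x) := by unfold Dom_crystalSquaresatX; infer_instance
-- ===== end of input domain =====

-- B replaces A's recursion over m by a flat loop with a running total, power and shrinking x (same cost, different decomposition).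

-- ===== PORT A =====
-- literal transliteration of A's recursion; the recursion parameter m (always ≥ 0 on the
-- recursive path, decremented by 1 each call, base case m < 1) is carried as the Nat m.toNat
def pvAGo : Nat → Int → Int
  | 0, _ => 0                        -- m ≥ 1 is false: return 0
  | n + 1, x =>                      -- m = n+1 ≥ 1; power = 5 ** (m-1)
    let power : Int := 5 ^ n
    let location := PySem.Int.floordiv x power
    if location = 0 ∨ location = 4 then 0
    else if location = 1 ∨ location = 3 then
      1 * power + pvAGo n (PySem.Int.mod x power)
    else if location = 2 then
      2 * power + pvAGo n (PySem.Int.mod x power)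
    else 0

def crystalSquaresatX (m : Int) (x : Int) : Int := pvAGo m.toNat x  -- m.toNat = 0 iff m < 1, A's base case

-- ===== PORT B =====
-- B's while loop: state (total, power, x); breaks (returns total) on a digit outside {1,2,3}.
-- The loop runs at most m times (power = 5^(m-1), divided by 5 each pass), so m.toNat is fuel.
def pvBGo : Nat → Int → Int → Int → Int
  | 0, total, _, _ => total
  | fuel + 1, total, power, x =>
    if 1 ≤ power then
      let location := PySem.Int.floordiv x power
      if location = 1 ∨ location = 3 then
        pvBGo fuel (total + power) (PySem.Int.floordiv power 5) (PySem.Int.mod x power)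
      else if location = 2 then
        pvBGo fuel (total + 2 * power) (PySem.Int.floordiv power 5) (PySem.Int.mod x power)
      else total
    else total

def crystalSquaresatX_alt (m : Int) (x : Int) : Int :=
  if m < 1 then 0
  else pvBGo m.toNat 0 ((5 : Int) ^ (m - 1).toNat) x

-- ===== PRECONDITION & SPEC =====
def Spec_crystalSquaresatX (m : Int) (x : Int) (out : Int) : Prop := out = crystalSquaresatX_alt m x
instance (m : Int) (x : Int) (out : Int) : Decidable (Spec_crystalSquaresatX m x out) := by unfold Spec_crystalSquaresatX; infer_instance

-- ===== CLAIM (what is proved, stated in full; the proofs are below) =====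
def Claim_equal_crystalSquaresatX : Prop := ∀ (m : Int) (x : Int), Dom_crystalSquaresatX m x → Spec_crystalSquaresatX m x (crystalSquaresatX m x)

-- ===== LEMMAS AND PROOFS =====

lemma pvPowFloordiv (n : Nat) : PySem.Int.floordiv ((5 : Int) ^ (n + 1)) 5 = (5 : Int) ^ n := by
  have h5 : PySem.Int.floordiv ((5 : Int) ^ (n + 1)) 5 = (5 : Int) ^ (n + 1) / 5 :=
    PySem.Int.floordiv_eq_ediv_of_pos (by positivity)
  rw [h5, pow_succ, Int.mul_ediv_cancel _ (by norm_num)]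

lemma pvLoopEq (n : Nat) : ∀ (total x : Int),
    pvBGo (n + 1) total ((5 : Int) ^ n) x = total + pvAGo (n + 1) x := by
  induction n with
  | zero =>
    intro total x
    rw [pvBGo, pvAGo]
    simp only [pow_zero]
    have hx : PySem.Int.floordiv x 1 = x := by
      rw [PySem.Int.floordiv_eq_ediv_of_pos (by norm_num)]; simp
    norm_num [hx]
    split_ifs with h1 h2 h3 <;> simp_all [pvBGo, pvAGo]; omega
  | succ n ih =>
    intro total x
    rw [pvBGo, pvAGo]
    have hpos : (1 : Int) ≤ (5 : Int) ^ (n + 1) := one_le_pow₀ (by norm_num)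
    rw [if_pos hpos]
    simp only [pvPowFloordiv]
    set p : Int := (5 : Int) ^ (n + 1) with hp
    set L := PySem.Int.floordiv x p with hL
    by_cases h04 : L = 0 ∨ L = 4
    · rw [if_neg (by omega), if_neg (by omega), if_pos h04]; omega
    · rw [if_neg h04]
      by_cases h13 : L = 1 ∨ L = 3
      · rw [if_pos h13, if_pos h13, ih]; ring
      · rw [if_neg h13, if_neg h13]
        by_cases h2 : L = 2
        · rw [if_pos h2, if_pos h2, ih]; ring
        · rw [if_neg h2, if_neg h2]; ring

-- ===== VERDICT (by name: the statement is the Claim_ definition above) =====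
theorem crystalSquaresatX_spec : Claim_equal_crystalSquaresatX := by
  intro m x _
  unfold Spec_crystalSquaresatX crystalSquaresatX_alt crystalSquaresatX
  by_cases hm : m < 1
  · rw [if_pos hm]
    have h0 : m.toNat = 0 := by omega
    rw [h0, pvAGo]
  · rw [if_neg hm]
    have hn : m.toNat = (m - 1).toNat + 1 := by omega
    rw [hn, pvLoopEq, zero_add]
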